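-- pv_equiv track=rewrite | github.com/VamsiImmanneni/finalProjectSWEGPT | problems/attentionalBlinks.py | transpose_with_diagonal_inversion
-- ===== SOURCE A (Python) =====
-- def transpose_with_diagonal_inversion(A, B):
--     """Transpose matrix A with inverted diagonal elements of B."""
--     n = len(A)
--     result = []
--     for i in range(n):
--         row = []
--         for j in range(n):
--             if i != j:
--                 row.append(A[j][i])
--             else:
--                 row.append(-B[i][j])
--         result.append(row)
--     return result
-- ===== SOURCE B (Python) =====
-- def transpose_with_diagonal_inversion(A, B):
--     """Transpose matrix A with inverted diagonal elements of B."""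
--     return [list(col[:i]) + [-B[i][i]] + list(col[i + 1:])
--             for i, col in zip(range(len(A)), zip(*A))]
-- ===== Notes on version B (the rewrite author's own statement) =====
-- stated objective: alternative
-- what changed: Replaces A's index-driven branched double loop with a column-peeling transpose (Python zip(*A), in Lean a head/tail peel recursion) paired with range(len(A)), each column turned into an output row by slice-splicing -B[i][i] into position i; Pre_ excludes ragged inputs, where A usually raises IndexError and, in the few ragged cases where it still returns, its value read off the ragged rows is as accidental as B's zip-truncation.
-- outside the precondition, e.g. on transpose_with_diagonal_inversion([[]], [[1]]): A returns [[-1]], B returns []; on transpose_with_diagonal_inversion([[1, 2], [3]], [[4, 5], [6, 7]]): A returns [[-4, 3], [2, -7]], B returns [[-4, 3]]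
import Mathlib
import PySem

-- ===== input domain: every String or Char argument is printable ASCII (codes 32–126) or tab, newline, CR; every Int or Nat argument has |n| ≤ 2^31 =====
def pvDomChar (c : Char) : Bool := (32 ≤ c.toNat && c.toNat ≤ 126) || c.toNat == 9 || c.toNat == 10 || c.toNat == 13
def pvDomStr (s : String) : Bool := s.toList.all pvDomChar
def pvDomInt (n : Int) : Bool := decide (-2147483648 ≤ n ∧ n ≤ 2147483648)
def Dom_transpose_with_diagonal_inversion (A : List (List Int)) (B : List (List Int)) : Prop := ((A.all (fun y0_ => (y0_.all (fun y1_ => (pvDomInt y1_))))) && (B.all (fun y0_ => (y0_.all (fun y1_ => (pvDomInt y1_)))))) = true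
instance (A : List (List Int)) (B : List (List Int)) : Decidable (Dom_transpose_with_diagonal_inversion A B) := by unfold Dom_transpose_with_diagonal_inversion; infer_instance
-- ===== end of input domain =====

-- B replaces the branched index double loop by a zip(*A) column peel plus slice-splicing
-- -B[i][i] into each column (objective: alternative algorithm, same asymptotic cost).

-- ===== PORT A =====
-- branched double loop: row gets A[j][i] off the diagonal and -B[i][j] on it
def transpose_with_diagonal_inversion (A : List (List Int)) (B : List (List Int)) : List (List Int) :=
  let n := A.length
  (List.range n).foldl
    (fun result i =>
      result ++ [(List.range n).foldl
        (fun row j =>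
          if i ≠ j then row ++ [(A.getD j []).getD i 0]
          else row ++ [-((B.getD i []).getD j 0)]) []])
    []

-- ===== PORT B =====
-- zip(*rows): peel the heads of all rows as one column, recurse on the tails; stops when a row
-- runs out. Fuel = length of the first row bounds the column count (Python zip stops at the
-- shortest row, which the isEmpty test detects), so this is exact for zip(*A).
def pvCols : Nat → List (List Int) → List (List Int)
  | 0, _ => []
  | fuel+1, rows =>
    if rows.any (fun r => r.isEmpty) then []
    else (rows.map (fun r => r.headD 0)) :: pvCols fuel (rows.map (fun r => r.tail))

-- zip(range(len(A)), zip(*A)) = pair the first len(A) columns with their index;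
-- col[:i] / col[i+1:] are nonnegative slices, exactly take/drop here
def transpose_with_diagonal_inversion_alt (A : List (List Int)) (B : List (List Int)) : List (List Int) :=
  let cols := pvCols ((A.headD []).length) A
  ((cols.take A.length).zipIdx).map
    (fun p => p.1.take p.2 ++ [-((B.getD p.2 []).getD p.2 0)] ++ p.1.drop (p.2 + 1))

-- ===== PRECONDITION & SPEC =====
-- Pre_ excludes ragged inputs: there A usually raises IndexError (in A or at B's diagonal), and in
-- the few ragged cases where A still returns (e.g. a row only missing entries A never reads), its
-- value read off the ragged rows is as accidental as B's silent zip-truncation.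
-- every row of A has length ≥ len(A), B has ≥ len(A) rows, and B[i] has length > i for i < len(A)
def Pre_transpose_with_diagonal_inversion (A : List (List Int)) (B : List (List Int)) : Prop :=
  (∀ row ∈ A, A.length ≤ row.length) ∧ A.length ≤ B.length ∧
  (∀ i ∈ List.range A.length, i < (B.getD i []).length)
instance (A : List (List Int)) (B : List (List Int)) : Decidable (Pre_transpose_with_diagonal_inversion A B) := by unfold Pre_transpose_with_diagonal_inversion; infer_instance
def pvWitness_transpose_with_diagonal_inversion : List (List Int) × List (List Int) :=
  ([[1, 2], [3, 4]], [[5, 6], [7, 8]])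
def Spec_transpose_with_diagonal_inversion (A : List (List Int)) (B : List (List Int)) (out : List (List Int)) : Prop := out = transpose_with_diagonal_inversion_alt A B
instance (A : List (List Int)) (B : List (List Int)) (out : List (List Int)) : Decidable (Spec_transpose_with_diagonal_inversion A B out) := by unfold Spec_transpose_with_diagonal_inversion; infer_instance

-- ===== CLAIM (what is proved, stated in full; the proofs are below) =====
def Claim_equal_transpose_with_diagonal_inversion : Prop := ∀ (A : List (List Int)) (B : List (List Int)), Dom_transpose_with_diagonal_inversion A B → Pre_transpose_with_diagonal_inversion A B → Spec_transpose_with_diagonal_inversion A B (transpose_with_diagonal_inversion A B)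

-- ===== LEMMAS AND PROOFS =====

-- append-accumulator fold = map
theorem pv_foldl_append_map {α β : Type} (f : α → β) :
    ∀ (l : List α) (acc : List β),
      l.foldl (fun r x => r ++ [f x]) acc = acc ++ l.map f := by
  intro l
  induction l with
  | nil => simp
  | cons x xs ih => intro acc; simp [List.foldl, ih]

-- A's branched inner loop = map of the branched entry
theorem pv_foldl_branch_map (i : Nat) (u v : Nat → Int) :
    ∀ (l : List Nat) (acc : List Int),
      l.foldl (fun row j => if i ≠ j then row ++ [u j] else row ++ [v j]) acc
        = acc ++ l.map (fun j => if i ≠ j then u j else v j) := by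
  intro l
  induction l with
  | nil => simp
  | cons x xs ih =>
      intro acc
      simp only [List.foldl_cons, List.map_cons]
      by_cases h : i ≠ x
      · rw [if_pos h, if_pos h, ih]; simp
      · rw [if_neg h, if_neg h, ih]; simp

theorem pv_headD_getD (r : List Int) : r.headD 0 = r.getD 0 0 := by
  cases r <;> simp

theorem pv_tail_getD (r : List Int) (i : Nat) : r.tail.getD i 0 = r.getD (i+1) 0 := by
  cases r <;> simp [List.getD]

-- the first n columns peeled by pvCols are the transpose columns, when every row has length ≥ n
theorem pv_cols_take (n : Nat) :
    ∀ (f : Nat) (rows : List (List Int)), n ≤ f → (∀ r ∈ rows, n ≤ r.length) →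
    (pvCols f rows).take n
      = (List.range n).map (fun i => rows.map (fun r => r.getD i 0)) := by
  induction n with
  | zero => intro f rows _ _; simp
  | succ n ih =>
    intro f rows hf hlen
    obtain ⟨f', rfl⟩ : ∃ f', f = f' + 1 := ⟨f - 1, by omega⟩
    have hany : rows.any (fun r => r.isEmpty) = false := by
      rw [List.any_eq_false]
      intro r hr
      have h := hlen r hr
      cases r with
      | nil => simp at h
      | cons a t => simp
    rw [pvCols, if_neg (by simp [hany])]
    rw [List.take_succ_cons, ih f' (rows.map (fun r => r.tail))
          (by omega)
          (by intro r hr; obtain ⟨s, hs, rfl⟩ := List.mem_map.mp hr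
              have := hlen s hs
              simp [List.length_tail]; omega)]
    rw [List.range_succ_eq_map]
    simp only [List.map_cons, List.map_map]
    congr 1
    · exact List.map_congr_left (fun r _ => pv_headD_getD r)
    · apply List.map_congr_left
      intro i _
      simp only [Function.comp]
      exact List.map_congr_left (fun r _ => pv_tail_getD r i)

-- zipIdx of a range-map pairs each value with its index
theorem pv_zipIdx_range_map {α : Type} [Inhabited α] (g : Nat → α) (n : Nat) :
    ((List.range n).map g).zipIdx = (List.range n).map (fun i => (g i, i)) := by
  apply List.ext_getElem
  · simp
  · intro k h1 h2
    simp [List.getElem_zipIdx]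

-- splicing v into position i of a length-n list = branched rebuild
theorem pv_splice (l : List Int) (v : Int) (i n : Nat) (hn : l.length = n) (hi : i < n) :
    l.take i ++ [v] ++ l.drop (i+1)
      = (List.range n).map (fun j => if i ≠ j then l.getD j 0 else v) := by
  have hti : (l.take i).length = i := by rw [List.length_take]; omega
  apply List.ext_getElem
  · simp only [List.length_append, List.length_map, List.length_range,
      List.length_cons, List.length_nil, List.length_drop, hti, hn]
    omega
  · intro k h1 h2
    simp only [List.length_map, List.length_range] at h2
    simp only [List.getElem_map, List.getElem_range]
    rw [List.getElem_append]
    by_cases hk2 : k < i + 1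
    · rw [dif_pos (by simp [hti]; omega), List.getElem_append]
      by_cases hk : k < i
      · rw [dif_pos (by simp [hti]; omega), List.getElem_take,
            if_pos (by omega), List.getD_eq_getElem l 0 (by omega)]
      · have hke : k = i := by omega
        subst hke
        rw [dif_neg (by simp [hti])]
        simp [hti]
    · rw [dif_neg (by simp [hti]; omega), List.getElem_drop, if_pos (by omega),
          List.getD_eq_getElem l 0 (by omega)]
      congr 1
      simp only [List.length_append, List.length_cons, List.length_nil, hti]
      omega

-- ===== VERDICT (by name: the statement is the Claim_ definition above) =====
theorem transpose_with_diagonal_inversion_spec : Claim_equal_transpose_with_diagonal_inversion := by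
  intro A B _ hpre
  obtain ⟨hrows, _, _⟩ := hpre
  unfold Spec_transpose_with_diagonal_inversion
  simp only [transpose_with_diagonal_inversion, transpose_with_diagonal_inversion_alt]
  have hfuel : A.length ≤ (A.headD []).length := by
    cases A with
    | nil => simp
    | cons r rs => exact hrows r (by simp)
  rw [pv_cols_take A.length _ A hfuel hrows]
  rw [pv_zipIdx_range_map]
  rw [pv_foldl_append_map, List.map_map, List.nil_append]
  apply List.map_congr_left
  intro i hi
  have hi' : i < A.length := List.mem_range.mp hi
  rw [pv_foldl_branch_map, List.nil_append]
  simp only [Function.comp]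
  rw [pv_splice (A.map (fun r => r.getD i 0)) (-((B.getD i []).getD i 0)) i A.length
        (by simp) hi']
  apply List.map_congr_left
  intro j hj
  have hj' : j < A.length := List.mem_range.mp hj
  by_cases h : i ≠ j
  · rw [if_pos h, if_pos h]
    rw [List.getD_eq_getElem (A.map fun r => r.getD i 0) 0 (by simp [hj'])]
    simp only [List.getElem_map]
    rw [List.getD_eq_getElem A [] hj']
  · rw [if_neg h, if_neg h]
    obtain rfl : i = j := not_not.mp h
    rfl
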